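-- pv_equiv track=rewrite | github.com/malleshkamati/AI | Mallesh_A_star.py | gn
-- ===== SOURCE A (Python) =====
-- def gn(initial,upto,graph):# the function for finding g(n) for A* that is actual path length upto the node
--     l=len(upto)
--     dist=0
--     for i in range(1,l):
--         b=upto[i]
--         a=upto[i-1]
--         b_graph=graph[a]
--         bl=len(b_graph)
--         for j in range(bl):
--             if b_graph[j][0]==b:
--                 dist+=b_graph[j][1]
--     return dist
-- ===== SOURCE B (Python) =====
-- def gn(initial, upto, graph):
--     # Invert the traversal: count each consecutive (a, b) pair of the path once,
--     # then make a single pass over ALL edges of the graph, adding each edge's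
--     # weight times the multiplicity of its endpoints-pair in the path.
--     pairs = {}
--     for p in zip(upto, upto[1:]):
--         pairs[p] = pairs.get(p, 0) + 1
--     total = 0
--     for a, adj in graph.items():
--         for node, w in adj:
--             total += w * pairs.get((a, node), 0)
--     return total
-- ===== Notes on version B (the rewrite author's own statement) =====
-- stated objective: alternative
-- what changed: B inverts the traversal: it counts the multiplicity of every consecutive node-pair of the path once, then sums weight*multiplicity in a single pass over all edges of the graph, instead of A's per-path-step scan of one adjacency list.
import Mathlib
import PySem

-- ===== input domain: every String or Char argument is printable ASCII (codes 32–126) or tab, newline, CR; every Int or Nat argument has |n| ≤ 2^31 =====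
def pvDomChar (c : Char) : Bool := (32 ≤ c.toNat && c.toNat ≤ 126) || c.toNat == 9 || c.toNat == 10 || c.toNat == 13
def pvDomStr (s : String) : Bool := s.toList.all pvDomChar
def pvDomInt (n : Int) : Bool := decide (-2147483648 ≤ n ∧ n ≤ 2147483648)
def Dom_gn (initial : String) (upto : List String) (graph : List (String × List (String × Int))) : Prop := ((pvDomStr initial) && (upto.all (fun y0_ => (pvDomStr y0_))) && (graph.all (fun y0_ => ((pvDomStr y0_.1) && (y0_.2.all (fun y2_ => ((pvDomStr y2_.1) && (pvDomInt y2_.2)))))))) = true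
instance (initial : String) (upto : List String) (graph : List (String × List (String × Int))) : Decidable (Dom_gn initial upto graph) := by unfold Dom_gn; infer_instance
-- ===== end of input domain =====

-- B inverts the traversal (path-pair multiplicities, then one pass over all graph
-- edges); same exact return value as A wherever A returns.

-- ===== PORT A =====
-- literal port of A: for each consecutive pair of the path, scan the adjacency
-- list by index, adding the weight of every matching edge.  graph[a] (dict
-- subscript) is (Dict.mk graph).get?; Pre_gn guarantees it is `some`
-- (Python raises KeyError there).
def gn (initial : String) (upto : List String) (graph : List (String × List (String × Int))) : Int :=
  let l : Int := upto.length
  (PySem.List.pyRange 1 l 1).foldl (fun dist i =>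
    let b := PySem.List.pyGetD upto i ""
    let a := PySem.List.pyGetD upto (i - 1) ""
    let bGraph := ((PySem.Dict.mk graph).get? a).getD []
    let bl : Int := bGraph.length
    (PySem.List.pyRange 0 bl 1).foldl (fun dist j =>
      if (PySem.List.pyGetD bGraph j ("", 0)).1 == b then
        dist + (PySem.List.pyGetD bGraph j ("", 0)).2
      else dist) dist) 0

-- ===== PORT B =====
-- pairs = {}; for p in zip(upto, upto[1:]): pairs[p] = pairs.get(p, 0) + 1
-- (upto[1:] is upto.drop 1; zip is List.zip)
def gnPairs (upto : List String) : PySem.Dict (String × String) Int :=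
  (upto.zip (upto.drop 1)).foldl (fun d p => d.insert p (d.getD p 0 + 1)) PySem.Dict.empty

def gn_alt (initial : String) (upto : List String) (graph : List (String × List (String × Int))) : Int :=
  let pairs := gnPairs upto
  graph.foldl (fun total g =>
    g.2.foldl (fun total e => total + e.2 * pairs.getD (g.1, e.1) 0) total) 0

-- ===== PRECONDITION & SPEC =====
-- Pre_gn excludes (a) paths with a non-final node missing from graph, where the
-- Python A raises KeyError, and (b) association lists with duplicate outer keys,
-- which cannot arise from a Python dict argument at all.
def Pre_gn (initial : String) (upto : List String) (graph : List (String × List (String × Int))) : Prop :=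
  (graph.map Prod.fst).Nodup ∧ ∀ p ∈ upto.zip (upto.drop 1), ((PySem.Dict.mk graph).get? p.1).isSome
instance (initial : String) (upto : List String) (graph : List (String × List (String × Int))) : Decidable (Pre_gn initial upto graph) := by unfold Pre_gn; infer_instance

def pvWitness_gn : String × List String × (List (String × List (String × Int))) :=
  ("s", ["a", "b", "a", "c"], [("a", [("b", 2), ("b", 3), ("c", 1)]), ("b", [("a", 1)]), ("c", [])])

def Spec_gn (initial : String) (upto : List String) (graph : List (String × List (String × Int))) (out : Int) : Prop := out = gn_alt initial upto graph
instance (initial : String) (upto : List String) (graph : List (String × List (String × Int))) (out : Int) : Decidable (Spec_gn initial upto graph out) := by unfold Spec_gn; infer_instance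

-- ===== CLAIM (what is proved, stated in full; the proofs are below) =====
def Claim_equal_gn : Prop := ∀ (initial : String) (upto : List String) (graph : List (String × List (String × Int))), Dom_gn initial upto graph → Pre_gn initial upto graph → Spec_gn initial upto graph (gn initial upto graph)

-- ===== LEMMAS AND PROOFS =====

-- the amount A's inner scan adds for one path step a -> b
def gnTerm (graph : List (String × List (String × Int))) (a b : String) : Int :=
  ((((PySem.Dict.mk graph).get? a).getD []).map (fun e => if e.1 == b then e.2 else 0)).sum

-- the weight attributed to one pair (a, b), summed over the whole graph
def gnEdgeHit (a b : String) (graph : List (String × List (String × Int))) : Int :=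
  (graph.map (fun g => (g.2.map (fun e => if (g.1, e.1) == (a, b) then e.2 else 0)).sum)).sum

theorem gnEdgeHit_cons (a b : String) (g : String × List (String × Int))
    (rest : List (String × List (String × Int))) :
    gnEdgeHit a b (g :: rest)
      = (g.2.map (fun e => if (g.1, e.1) == (a, b) then e.2 else 0)).sum + gnEdgeHit a b rest := by
  unfold gnEdgeHit
  rw [List.map_cons, List.sum_cons]

theorem gnEdgeHit_of_not_mem (a b : String) (graph : List (String × List (String × Int)))
    (h : a ∉ graph.map Prod.fst) : gnEdgeHit a b graph = 0 := by
  unfold gnEdgeHit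
  apply List.sum_eq_zero
  intro x hx
  rw [List.mem_map] at hx
  obtain ⟨g, hg, rfl⟩ := hx
  apply List.sum_eq_zero
  intro y hy
  rw [List.mem_map] at hy
  obtain ⟨e, he, rfl⟩ := hy
  have hga : g.1 ≠ a := fun hh => h (List.mem_map.mpr ⟨g, hg, hh⟩)
  simp [hga]

theorem gnEdgeHit_lookup (a b : String) (graph : List (String × List (String × Int)))
    (adj : List (String × Int)) (hnd : (graph.map Prod.fst).Nodup)
    (hget : (PySem.Dict.mk graph).get? a = some adj) :
    gnEdgeHit a b graph = (adj.map (fun e => if e.1 == b then e.2 else 0)).sum := by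
  induction graph with
  | nil => simp [PySem.Dict.get?] at hget
  | cons g rest ih =>
    rw [PySem.Dict.get?_mk_cons] at hget
    simp only [List.map_cons, List.nodup_cons] at hnd
    rw [gnEdgeHit_cons]
    by_cases h : g.1 = a
    · rw [if_pos (by simp [h])] at hget
      cases hget
      rw [gnEdgeHit_of_not_mem a b rest (h ▸ hnd.1), add_zero]
      apply congrArg
      apply List.map_congr_left
      intro e _
      simp [h]
    · rw [if_neg (by simp [h])] at hget
      have h1 : (g.2.map (fun e => if (g.1, e.1) == (a, b) then e.2 else 0)).sum = 0 := by
        apply List.sum_eq_zero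
        intro y hy
        rw [List.mem_map] at hy
        obtain ⟨e, he, rfl⟩ := hy
        simp [h]
      rw [h1, zero_add]
      exact ih hnd.2 hget

-- the central exchange of summation order: summing A's per-pair contributions
-- over the path equals summing weight * pair-multiplicity over the graph
theorem gn_swap (graph : List (String × List (String × Int))) :
    ∀ (P : List (String × String)),
      (graph.map Prod.fst).Nodup →
      (∀ p ∈ P, ((PySem.Dict.mk graph).get? p.1).isSome) →
      (P.map (fun p => gnTerm graph p.1 p.2)).sum
      = (graph.map (fun g =>
          (g.2.map (fun e => e.2 * (P.count (g.1, e.1) : Int))).sum)).sum := by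
  intro P
  induction P with
  | nil => intro _ _; simp
  | cons p P' ih =>
    intro hnd hall
    have hsplit : (graph.map (fun g =>
        (g.2.map (fun e => e.2 * ((p :: P').count (g.1, e.1) : Int))).sum)).sum
      = (graph.map (fun g =>
          (g.2.map (fun e => e.2 * (P'.count (g.1, e.1) : Int))).sum)).sum
        + gnEdgeHit p.1 p.2 graph := by
      unfold gnEdgeHit
      rw [← PySem.List.sum_map_add_int]
      apply congrArg
      apply List.map_congr_left
      intro g _
      rw [← PySem.List.sum_map_add_int]
      apply congrArg
      apply List.map_congr_left
      intro e _
      rw [List.count_cons]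
      by_cases hc : (g.1, e.1) = p
      · subst hc
        simp
        ring
      · simp [hc]
        exact Or.inl (fun hh => hc hh.symm)
    rw [hsplit]
    simp only [List.map_cons, List.sum_cons]
    rw [ih hnd (fun q hq => hall q (List.mem_cons_of_mem p hq))]
    have hp := hall p List.mem_cons_self
    obtain ⟨adj, hadj⟩ := Option.isSome_iff_exists.mp hp
    unfold gnTerm
    rw [hadj, gnEdgeHit_lookup p.1 p.2 graph adj hnd hadj]
    simp only [Option.getD_some]
    ring

-- A's indexed outer loop reads exactly the consecutive pairs of the path
theorem gn_pyRange_eq_zip (upto : List String) (f : String → String → Int) :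
    ((PySem.List.pyRange 1 (upto.length : Int) 1).map
      (fun i => f (PySem.List.pyGetD upto (i - 1) "") (PySem.List.pyGetD upto i "")))
    = (upto.zip (upto.drop 1)).map (fun p => f p.1 p.2) := by
  apply List.ext_getElem
  · simp [PySem.List.length_pyRange_one]
  · intro k hk1 hk2
    simp only [List.getElem_map]
    have hlen : (PySem.List.pyRange 1 (upto.length : Int) 1).length = upto.length - 1 := by
      rw [PySem.List.length_pyRange_one]
      omega
    rw [List.length_map, hlen] at hk1
    rw [PySem.List.getElem_pyRange_one]
    have e1 : PySem.List.pyGetD upto (1 + (k : Int) - 1) "" = upto[k] := by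
      rw [PySem.List.pyGetD_eq_getElem upto "" (by omega) (by omega)]
      congr 1
      omega
    have e2 : PySem.List.pyGetD upto (1 + (k : Int)) "" = upto[k + 1] := by
      rw [PySem.List.pyGetD_eq_getElem upto "" (by omega) (by omega)]
      congr 1
      omega
    rw [e1, e2, List.getElem_zip]
    have e3 : (upto.drop 1)[k]'(by simp; omega) = upto[k + 1] := by
      rw [List.getElem_drop]
      congr 1
      omega
    rw [e3]

-- B's counting dict holds exactly the pair multiplicities
theorem gnPairs_getD (upto : List String) (v : String × String) :
    (gnPairs upto).getD v 0 = ((upto.zip (upto.drop 1)).count v : Int) := by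
  unfold gnPairs
  rw [PySem.Dict.getD_foldl_insert_add_one]
  simp

-- A's value as a sum over the consecutive pairs of the path
theorem gn_eq_sum (initial : String) (upto : List String)
    (graph : List (String × List (String × Int))) :
    gn initial upto graph = ((upto.zip (upto.drop 1)).map (fun p => gnTerm graph p.1 p.2)).sum := by
  unfold gn
  have hstep : ∀ (acc : Int), ∀ i ∈ PySem.List.pyRange 1 (upto.length : Int) 1,
      (fun dist i =>
        let b := PySem.List.pyGetD upto i ""
        let a := PySem.List.pyGetD upto (i - 1) ""
        let bGraph := ((PySem.Dict.mk graph).get? a).getD []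
        let bl : Int := bGraph.length
        (PySem.List.pyRange 0 bl 1).foldl (fun dist j =>
          if (PySem.List.pyGetD bGraph j ("", 0)).1 == b then
            dist + (PySem.List.pyGetD bGraph j ("", 0)).2
          else dist) dist) acc i
      = acc + gnTerm graph (PySem.List.pyGetD upto (i - 1) "") (PySem.List.pyGetD upto i "") := by
    intro acc i _
    dsimp only
    rw [PySem.List.foldl_pyRange_zero_pyGetD' _ ("", 0)
      (fun dist e => if e.1 == PySem.List.pyGetD upto i "" then dist + e.2 else dist) acc]
    refine Eq.trans (PySem.List.foldl_congr_mem _ _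
      (fun (dist : Int) (e : String × Int) =>
        dist + (if e.1 == PySem.List.pyGetD upto i "" then e.2 else 0)) _ ?_)
      (by rw [PySem.List.foldl_add]; rfl)
    intro acc' e _
    dsimp only
    split_ifs <;> simp
  rw [PySem.List.foldl_congr_mem _ _ _ _ hstep, PySem.List.foldl_add, zero_add,
    gn_pyRange_eq_zip upto (gnTerm graph)]

-- B's value as the weight-times-multiplicity double sum over the graph
theorem gn_alt_eq_sum (initial : String) (upto : List String)
    (graph : List (String × List (String × Int))) :
    gn_alt initial upto graph = (graph.map (fun g =>
      (g.2.map (fun e => e.2 * ((upto.zip (upto.drop 1)).count (g.1, e.1) : Int))).sum)).sum := by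
  unfold gn_alt
  have hstepB : ∀ (acc : Int), ∀ g ∈ graph,
      g.2.foldl (fun total e => total + e.2 * (gnPairs upto).getD (g.1, e.1) 0) acc
      = acc + (g.2.map (fun e =>
          e.2 * ((upto.zip (upto.drop 1)).count (g.1, e.1) : Int))).sum := by
    intro acc g _
    rw [PySem.List.foldl_add]
    apply congrArg
    apply congrArg
    apply List.map_congr_left
    intro e _
    rw [gnPairs_getD]
  rw [PySem.List.foldl_congr_mem _ _ _ _ hstepB, PySem.List.foldl_add, zero_add]

-- ===== VERDICT (by name: the statement is the Claim_ definition above) =====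
theorem gn_spec : Claim_equal_gn := by
  intro initial upto graph _ hpre
  obtain ⟨hnd, hkeys⟩ := hpre
  unfold Spec_gn
  rw [gn_eq_sum, gn_alt_eq_sum]
  exact gn_swap graph (upto.zip (upto.drop 1)) hnd hkeys
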